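-- pv_equiv track=rewrite | github.com/ashutoshrathi0909-oss/cma-automation | backend/app/mappings/year_columns.py | build_year_map
-- ===== SOURCE A (Python) =====
-- _COLUMN_LETTERS = "BCDEFGHIJKLM"
--
-- def get_year_column(year: int, base_year: int) -> str | None:
--     """Return the column letter for *year* given a *base_year* in column B.
--
--     Returns None if the year falls outside the supported range (B–M).
--     """
--     offset = year - base_year
--     if 0 <= offset < len(_COLUMN_LETTERS):
--         return _COLUMN_LETTERS[offset]
--     return None
--
-- def build_year_map(financial_years: list[int]) -> dict[int, str]:
--     """Build a {year: column_letter} mapping from actual document years.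
--
--     The earliest year maps to column B, next to C, etc.
--     Returns empty dict if no years provided.
--     """
--     if not financial_years:
--         return {}
--     base = min(financial_years)
--     return {
--         yr: col
--         for yr in sorted(set(financial_years))
--         if (col := get_year_column(yr, base)) is not None
--     }
-- ===== SOURCE B (Python) =====
-- _COLUMN_LETTERS = "BCDEFGHIJKLM"
--
--
-- def build_year_map(financial_years: list[int]) -> dict[int, str]:
--     """Build a {year: column_letter} mapping by scanning the 12 column slots.
--
--     Instead of sorting the distinct years, walk the bounded column range
--     starting at the earliest year and keep the slots actually present.
--     """
--     if not financial_years: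
--         return {}
--     base = min(financial_years)
--     years = set(financial_years)
--     result = {}
--     for offset, letter in enumerate(_COLUMN_LETTERS):
--         yr = base + offset
--         if yr in years:
--             result[yr] = letter
--     return result
-- ===== Notes on version B (the rewrite author's own statement) =====
-- stated objective: alternative
-- what changed: B replaces A's sort of the distinct years (sorted(set(xs)) then per-year column lookup) by a single pass over the 12 bounded column slots starting at min(xs), keeping each slot whose year is in a set of the input; insertion order stays year-ascending.
import Mathlib
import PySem

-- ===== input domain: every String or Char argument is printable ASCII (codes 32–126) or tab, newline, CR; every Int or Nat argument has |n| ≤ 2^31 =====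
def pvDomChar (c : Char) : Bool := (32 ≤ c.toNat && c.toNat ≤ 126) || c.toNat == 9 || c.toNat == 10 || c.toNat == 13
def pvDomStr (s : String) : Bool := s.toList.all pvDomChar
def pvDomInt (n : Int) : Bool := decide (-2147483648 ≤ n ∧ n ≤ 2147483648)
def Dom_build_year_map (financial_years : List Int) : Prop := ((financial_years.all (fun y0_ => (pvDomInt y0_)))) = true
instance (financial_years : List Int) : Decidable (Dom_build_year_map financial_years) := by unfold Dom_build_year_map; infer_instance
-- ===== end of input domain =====

-- B replaces A's sort of the distinct years by a single scan over the 12 bounded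
-- column slots with set-membership tests (same return value, same insertion order).

-- ===== PORT A =====
def pvCOLUMN_LETTERS : String := "BCDEFGHIJKLM"

def get_year_column (year : Int) (base_year : Int) : Option String :=
  let offset := year - base_year
  if 0 ≤ offset ∧ offset < PySem.Str.len pvCOLUMN_LETTERS then
    -- s[offset] is a one-char str in Python: pyGet? yields the char, singleton makes the str
    (PySem.Str.pyGet? pvCOLUMN_LETTERS offset).map String.singleton
  else none

def build_year_map (financial_years : List Int) : List (Int × String) :=
  if financial_years = [] then []
  else
    match PySem.List.min? financial_years (fun x => x) with
    | none => []   -- unreachable: the list is nonempty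
    | some base =>
      ((PySem.List.sorted (PySem.Set.ofList financial_years) (fun x => x) false).foldl
        (fun d yr =>
          match get_year_column yr base with
          | some col => d.insert yr col
          | none => d)
        PySem.Dict.empty).items

-- ===== PORT B =====
def build_year_map_alt (financial_years : List Int) : List (Int × String) :=
  if financial_years = [] then []
  else
    match PySem.List.min? financial_years (fun x => x) with
    | none => []   -- unreachable: the list is nonempty
    | some base =>
      let years := PySem.Set.ofList financial_years
      -- enumerate over the string yields (offset, one-char string); chars carry it here
      ((PySem.List.enumerate pvCOLUMN_LETTERS.toList 0).foldl
        (fun d p =>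
          let yr := base + p.1
          if yr ∈ years then d.insert yr (String.singleton p.2) else d)
        PySem.Dict.empty).items

-- ===== PRECONDITION & SPEC =====
def Spec_build_year_map (financial_years : List Int) (out : List (Int × String)) : Prop := out = build_year_map_alt financial_years
instance (financial_years : List Int) (out : List (Int × String)) : Decidable (Spec_build_year_map financial_years out) := by unfold Spec_build_year_map; infer_instance

-- ===== CLAIM (what is proved, stated in full; the proofs are below) =====
def Claim_equal_build_year_map : Prop := ∀ (financial_years : List Int), Dom_build_year_map financial_years → Spec_build_year_map financial_years (build_year_map financial_years)

-- ===== LEMMAS AND PROOFS =====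

-- a conditional-insert loop equals the insert loop over the filtered list
theorem pv_foldl_if_insert_eq_filter {α ν : Type} (l : List α) (p : α → Bool) (k : α → Int)
    (v : α → ν) :
    ∀ (d : PySem.Dict Int ν),
      l.foldl (fun d x => if p x then d.insert (k x) (v x) else d) d
        = (l.filter p).foldl (fun d x => d.insert (k x) (v x)) d := by
  induction l with
  | nil => intro d; simp
  | cons a t ih => intro d; by_cases h : p a = true <;> simp [h, ih]

-- a conditional-insert loop from the empty dict yields the filtered pair list
theorem pv_items_foldl_if_insert {α ν : Type} (l : List α) (p : α → Bool) (k : α → Int) (v : α → ν)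
    (hnd : ((l.filter p).map k).Nodup) :
    (l.foldl (fun d x => if p x then d.insert (k x) (v x) else d) PySem.Dict.empty).items
      = (l.filter p).map (fun x => (k x, v x)) := by
  rw [pv_foldl_if_insert_eq_filter,
    PySem.Dict.items_foldl_insert_fresh _ _ _ _ (by intro a _; rfl) hnd]
  rfl

-- the in-range column lookup, concretely
theorem pv_pyGet_eq (o : Int) (h0 : 0 ≤ o) (h1 : o < 12) :
    PySem.Str.pyGet? pvCOLUMN_LETTERS o
      = some (pvCOLUMN_LETTERS.toList.getD o.toNat 'A') := by
  interval_cases o <;> decide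

theorem pv_main (fy : List Int) (base : Int) :
    ((PySem.List.sorted (PySem.Set.ofList fy) (fun x => x) false).foldl
        (fun d yr =>
          match get_year_column yr base with
          | some col => d.insert yr col
          | none => d)
        PySem.Dict.empty).items
    = ((PySem.List.enumerate pvCOLUMN_LETTERS.toList 0).foldl
        (fun d p =>
          if base + p.1 ∈ PySem.Set.ofList fy then d.insert (base + p.1) (String.singleton p.2) else d)
        PySem.Dict.empty).items := by
  set ys := PySem.List.sorted (PySem.Set.ofList fy) (fun x => x) false with hys
  set E := PySem.List.enumerate pvCOLUMN_LETTERS.toList 0 with hE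
  have hyslt : ys.Pairwise (· < ·) := PySem.List.sorted_ofList_pairwise_lt fy
  have hlen12 : pvCOLUMN_LETTERS.toList.length = 12 := by decide
  -- A's loop body as a conditional insert
  have hstepfun :
      (fun (d : PySem.Dict Int String) yr =>
        match get_year_column yr base with
        | some col => d.insert yr col
        | none => d)
      = (fun d yr =>
          if (decide (0 ≤ yr - base) && decide (yr - base < 12)) = true then
            d.insert yr (String.singleton (pvCOLUMN_LETTERS.toList.getD (yr - base).toNat 'A'))
          else d) := by
    funext d yr
    have hlen : PySem.Str.len pvCOLUMN_LETTERS = (12 : Int) := by decide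
    simp only [get_year_column, hlen]
    by_cases h0 : 0 ≤ yr - base
    · by_cases h1 : yr - base < 12
      · rw [if_pos ⟨h0, h1⟩, pv_pyGet_eq (yr - base) h0 h1,
          if_pos (by simp only [Bool.and_eq_true, decide_eq_true_eq]; omega)]
        rfl
      · rw [if_neg (by omega), if_neg (by simp only [Bool.and_eq_true, decide_eq_true_eq]; omega)]
    · rw [if_neg (by omega), if_neg (by simp only [Bool.and_eq_true, decide_eq_true_eq]; omega)]
  rw [hstepfun]
  -- both folds become filtered pair lists
  have hAnd : ((ys.filter (fun yr => decide (0 ≤ yr - base) && decide (yr - base < 12))).map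
      (fun x => x)).Nodup := by
    simpa using (List.Pairwise.filter _ hyslt).nodup
  have hA := pv_items_foldl_if_insert ys
      (fun yr => decide (0 ≤ yr - base) && decide (yr - base < 12))
      (fun x => x)
      (fun yr => String.singleton (pvCOLUMN_LETTERS.toList.getD (yr - base).toNat 'A')) hAnd
  have hElt : E.Pairwise (fun p q => p.1 < q.1) := PySem.List.pairwise_lt_enumerate _ _
  have hBlt : ((E.filter (fun p => decide (base + p.1 ∈ PySem.Set.ofList fy))).map
      (fun p => base + p.1)).Pairwise (· < ·) :=
    List.pairwise_map.mpr ((List.Pairwise.filter _ hElt).imp (by intro a b h; omega))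
  have hBnd : ((E.filter (fun p => decide (base + p.1 ∈ PySem.Set.ofList fy))).map
      (fun p => base + p.1)).Nodup := hBlt.nodup
  have hBfun :
      (fun (d : PySem.Dict Int String) (p : Int × Char) =>
        if base + p.1 ∈ PySem.Set.ofList fy then d.insert (base + p.1) (String.singleton p.2) else d)
      = (fun d p =>
        if (decide (base + p.1 ∈ PySem.Set.ofList fy)) = true then
          d.insert (base + p.1) (String.singleton p.2) else d) := by
    funext d p; split_ifs <;> simp_all
  rw [hBfun]
  have hB := pv_items_foldl_if_insert E
      (fun p => decide (base + p.1 ∈ PySem.Set.ofList fy))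
      (fun p => base + p.1)
      (fun p => String.singleton p.2) hBnd
  rw [hA, hB]
  -- the filtered year lists coincide
  set ysf := ys.filter (fun yr => decide (0 ≤ yr - base) && decide (yr - base < 12)) with hysf
  set Ef := E.filter (fun p => decide (base + p.1 ∈ PySem.Set.ofList fy)) with hEf
  have hysfnd : ysf.Nodup := by
    simpa [hysf] using (List.Pairwise.filter _ hyslt).nodup
  have hEfnd : (Ef.map (fun p => base + p.1)).Nodup := hBnd
  have hyears : ysf = Ef.map (fun p => base + p.1) := by
    have hperm : ysf.Perm (Ef.map (fun p => base + p.1)) := by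
      rw [List.perm_ext_iff_of_nodup hysfnd hEfnd]
      intro x
      constructor
      · intro hx
        rw [hysf, List.mem_filter] at hx
        obtain ⟨hxm, hxc⟩ := hx
        rw [hys, PySem.List.mem_sorted, PySem.Set.mem_ofList] at hxm
        simp only [Bool.and_eq_true, decide_eq_true_eq] at hxc
        rw [List.mem_map]
        refine ⟨((x - base), pvCOLUMN_LETTERS.toList[(x - base).toNat]'(by omega)), ?_, by omega⟩
        rw [hEf, List.mem_filter]
        constructor
        · rw [hE, PySem.List.mem_enumerate_iff]
          exact ⟨(x - base).toNat, by omega, by simp; omega⟩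
        · simp only [decide_eq_true_eq]
          have hxb : base + (x - base) = x := by omega
          rw [hxb, PySem.Set.mem_ofList]
          exact hxm
      · intro hx
        rw [List.mem_map] at hx
        obtain ⟨p, hpm, hpx⟩ := hx
        rw [hEf, List.mem_filter] at hpm
        obtain ⟨hpE, hpc⟩ := hpm
        rw [hE, PySem.List.mem_enumerate_iff] at hpE
        obtain ⟨k, hk, hpk⟩ := hpE
        simp only [decide_eq_true_eq] at hpc
        rw [PySem.Set.mem_ofList] at hpc
        rw [hysf, List.mem_filter]
        constructor
        · rw [hys, PySem.List.mem_sorted, PySem.Set.mem_ofList]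
          rw [← hpx]; exact hpc
        · subst hpk
          simp only [zero_add] at hpx
          simp only [Bool.and_eq_true, decide_eq_true_eq]
          omega
    exact List.Perm.eq_of_pairwise'
      ((List.Pairwise.filter _ hyslt).imp (fun h => le_of_lt h))
      (List.pairwise_map.mpr ((List.Pairwise.filter _ hElt).imp (by intro a b h; omega)))
      hperm
  rw [hyears, List.map_map]
  apply List.map_congr_left
  intro p hp
  rw [hEf, List.mem_filter] at hp
  obtain ⟨hpE, _⟩ := hp
  have hpf : ∀ q ∈ PySem.List.enumerate pvCOLUMN_LETTERS.toList 0,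
      String.singleton q.2 = String.singleton (pvCOLUMN_LETTERS.toList.getD q.1.toNat 'A') := by
    decide
  have hq := hpf p (hE ▸ hpE)
  simp only [Function.comp]
  have hpb : base + p.1 - base = p.1 := by omega
  rw [hpb, ← hq]

-- ===== VERDICT (by name: the statement is the Claim_ definition above) =====
theorem build_year_map_spec : Claim_equal_build_year_map := by
  intro fy _
  unfold Spec_build_year_map build_year_map build_year_map_alt
  by_cases hfy : fy = []
  · simp [hfy]
  · simp only [hfy, if_false]
    cases hmin : PySem.List.min? fy (fun x => x) with
    | none => rfl
    | some base => exact pv_main fy base
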